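-- pv_equiv track=rewrite | github.com/shenzhongjun/work_script | product/orderCreator/orderCreator.py | format_batchs
-- ===== SOURCE A (Python) =====
-- def format_batchs(batchs):
--     """处理参数输入的批次信息，支持','分割和'-'连续的批次"""
--     batch_list = []
--     if ',' in batchs and '-' in batchs:
--         a = batchs.split(',')
--         for i in a:
--             if '-' in i:
--                 start, end = i.split('-')
--                 for l in range(int(start), int(end) + 1):
--                     batch_list.append(str(l))
--             else:
--                 batch_list.append(str(i))
--     elif ',' in batchs:
--         for i in batchs.split(','):
--             batch_list.append(str(i))
--     elif '-' in batchs: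
--         start, end = batchs.split('-')
--         for l in range(int(start), int(end) + 1):
--             batch_list.append(str(l))
--     else:
--         batch_list.append(batchs)
--     return batch_list
-- ===== SOURCE B (Python) =====
-- def format_batchs(batchs):
--     """处理参数输入的批次信息，支持','分割和'-'连续的批次"""
--     batch_list = []
--     cur = ''
--     start = None
--     for ch in batchs + ',':
--         if ch == ',':
--             if start is None:
--                 batch_list.append(cur)
--             else:
--                 for x in range(int(start), int(cur) + 1):
--                     batch_list.append(str(x))
--             cur, start = '', None
--         elif ch == '-':
--             start, cur = cur, ''
--         else:
--             cur += ch
--     return batch_list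
-- ===== Notes on version B (the rewrite author's own statement) =====
-- stated objective: alternative
-- what changed: B is a single character-level state machine scanning batchs+',' with (current piece, optional range start) state, instead of A's four-way dispatch on which separators occur followed by split()-based passes.
import Mathlib
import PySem

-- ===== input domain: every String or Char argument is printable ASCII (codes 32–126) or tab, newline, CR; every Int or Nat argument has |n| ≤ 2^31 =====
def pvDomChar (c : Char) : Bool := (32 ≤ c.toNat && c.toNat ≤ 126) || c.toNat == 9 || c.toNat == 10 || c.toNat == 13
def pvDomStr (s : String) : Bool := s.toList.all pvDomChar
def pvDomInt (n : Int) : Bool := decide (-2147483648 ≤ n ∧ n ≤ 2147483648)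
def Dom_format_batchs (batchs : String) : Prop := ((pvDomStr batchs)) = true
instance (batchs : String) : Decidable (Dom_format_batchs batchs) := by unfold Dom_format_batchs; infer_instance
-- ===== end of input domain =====

-- B replaces A's four-way split-based dispatch with a single character-level state machine
-- (accumulating the current piece and an optional range start), for a simpler decomposition.


-- ===== PORT A =====
-- A's four-way dispatch: both separators / only ',' / only '-' / neither.
-- Where Python raises (unpacking a split('-') that is not exactly two pieces, or int() failing)
-- Pre_format_batchs excludes the input; the `_ => …` arm / `.getD 0` are only reached there.
def format_batchs (batchs : String) : List String :=
  if PySem.Str.isIn "," batchs && PySem.Str.isIn "-" batchs then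
    (PySem.Chars.splitOn batchs.toList [',']).foldl (fun batch_list i =>
      if PySem.Chars.isIn ['-'] i then
        match PySem.Chars.splitOn i ['-'] with
        | [s, e] =>
            batch_list ++ (PySem.List.pyRange ((PySem.Int.ofChars? s).getD 0)
              ((PySem.Int.ofChars? e).getD 0 + 1) 1).map PySem.Int.toStr
        | _ => batch_list
      else batch_list ++ [String.ofList i]) []
  else if PySem.Str.isIn "," batchs then
    (PySem.Chars.splitOn batchs.toList [',']).foldl
      (fun batch_list i => batch_list ++ [String.ofList i]) []
  else if PySem.Str.isIn "-" batchs then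
    match PySem.Chars.splitOn batchs.toList ['-'] with
    | [s, e] =>
        (PySem.List.pyRange ((PySem.Int.ofChars? s).getD 0)
          ((PySem.Int.ofChars? e).getD 0 + 1) 1).map PySem.Int.toStr
    | _ => []
  else [batchs]

-- ===== PORT B =====
-- B: one scan of the characters of `batchs + ','`; state = (output, current piece, optional
-- range start). ',' flushes the state, '-' moves the current piece into `start`, any other
-- character extends the current piece. `.getD 0` is only reached where Python's int() raises
-- (excluded by Pre_format_batchs).
def fbGo (out : List String) (cur : List Char) (start : Option (List Char)) :
    List Char → List String
  | [] => out
  | ch :: rest =>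
    if ch = ',' then
      fbGo (match start with
            | none => out ++ [String.ofList cur]
            | some s => out ++ (PySem.List.pyRange ((PySem.Int.ofChars? s).getD 0)
                ((PySem.Int.ofChars? cur).getD 0 + 1) 1).map PySem.Int.toStr)
        [] none rest
    else if ch = '-' then
      fbGo out [] (some cur) rest
    else
      fbGo out (cur ++ [ch]) start rest

def format_batchs_alt (batchs : String) : List String :=
  fbGo [] [] none (batchs.toList ++ [','])

-- ===== PRECONDITION & SPEC =====
-- Pre_: A raises ValueError exactly when some comma-token containing '-' does not split into
-- exactly two pieces, or a piece of a dash token is not a valid int() literal; those inputs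
-- are excluded.
def Pre_format_batchs (batchs : String) : Prop :=
  ∀ tok ∈ PySem.Chars.splitOn batchs.toList [','],
    PySem.Chars.isIn ['-'] tok = true →
      (PySem.Chars.splitOn tok ['-']).length = 2 ∧
      ∀ p ∈ PySem.Chars.splitOn tok ['-'], (PySem.Int.ofChars? p).isSome
instance (batchs : String) : Decidable (Pre_format_batchs batchs) := by
  unfold Pre_format_batchs; infer_instance
def pvWitness_format_batchs : String := "1,3-5,9"
def Spec_format_batchs (batchs : String) (out : List String) : Prop := out = format_batchs_alt batchs
instance (batchs : String) (out : List String) : Decidable (Spec_format_batchs batchs out) := by unfold Spec_format_batchs; infer_instance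

-- ===== CLAIM (what is proved, stated in full; the proofs are below) =====
def Claim_equal_format_batchs : Prop := ∀ (batchs : String), Dom_format_batchs batchs → Pre_format_batchs batchs → Spec_format_batchs batchs (format_batchs batchs)

-- ===== LEMMAS AND PROOFS =====

-- Reference recursion for splitting on a single separator character.
def mySplit (cs : List Char) (c : Char) : List (List Char) :=
  match cs with
  | [] => [[]]
  | x :: xs =>
    if x = c then [] :: mySplit xs c
    else (x :: (mySplit xs c).headI) :: (mySplit xs c).tail

theorem mySplit_ne_nil (cs : List Char) (c : Char) : mySplit cs c ≠ [] := by
  cases cs with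
  | nil => simp [mySplit]
  | cons x xs => simp only [mySplit]; split <;> simp

theorem mySplit_cons (xs : List Char) (c : Char) :
    ∃ hd t, mySplit xs c = hd :: t := by
  rcases h : mySplit xs c with _ | ⟨hd, t⟩
  · exact absurd h (mySplit_ne_nil xs c)
  · exact ⟨hd, t, rfl⟩

theorem go_eq (c : Char) (fuel : ℕ) (l cur : List Char) (acc : List (List Char))
    (h : l.length ≤ fuel) :
    PySem.Chars.splitOn.go [c] fuel l cur acc
      = acc.reverse ++ ((mySplit l c).modifyHead (cur.reverse ++ ·)) := by
  induction fuel generalizing l cur acc with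
  | zero =>
    have : l = [] := List.length_eq_zero_iff.mp (Nat.le_zero.mp h)
    subst this
    simp [PySem.Chars.splitOn.go, mySplit]
  | succ n ih =>
    cases l with
    | nil => simp [PySem.Chars.splitOn.go, mySplit]
    | cons x rest =>
      simp only [PySem.Chars.splitOn.go]
      obtain ⟨hd, t, hm⟩ := mySplit_cons rest c
      by_cases hx : x = c
      · subst hx
        have hpre : List.isPrefixOf [x] (x :: rest) = true := by simp [List.isPrefixOf]
        rw [if_pos hpre]
        simp only [List.length_cons, List.length_nil, List.drop_succ_cons, List.drop_zero]
        rw [ih rest [] ((cur.reverse) :: acc) (by simpa using Nat.le_of_succ_le_succ h)]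
        simp [mySplit, hm]
      · have hpre : List.isPrefixOf [c] (x :: rest) = false := by
          simp [List.isPrefixOf]; exact fun hh => absurd hh.symm hx
        rw [if_neg (by simp [hpre])]
        rw [ih rest (x :: cur) acc (by simpa using Nat.le_of_succ_le_succ h)]
        simp [mySplit, hm, hx]

theorem splitOn_single (cs : List Char) (c : Char) :
    PySem.Chars.splitOn cs [c] = mySplit cs c := by
  rw [PySem.Chars.splitOn, go_eq c _ _ _ _ (by omega)]
  cases mySplit cs c <;> simp

theorem isIn_single (c : Char) (cs : List Char) :
    PySem.Chars.isIn [c] cs = true ↔ c ∈ cs := by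
  rw [PySem.Chars.isIn_iff_infix]
  exact List.singleton_infix_iff c cs

theorem mem_of_mem_mySplit {d : Char} {tok cs : List Char} {c : Char}
    (htok : tok ∈ mySplit cs c) (hd : d ∈ tok) : d ∈ cs := by
  induction cs generalizing tok with
  | nil =>
    simp [mySplit] at htok
    subst htok; simp at hd
  | cons x xs ih =>
    obtain ⟨h, t, hm⟩ := mySplit_cons xs c
    by_cases hx : x = c
    · simp only [mySplit, hx, if_true] at htok
      rcases List.mem_cons.mp htok with h1 | h1
      · subst h1; simp at hd
      · exact List.mem_cons_of_mem x (ih h1 hd)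
    · simp only [mySplit, if_neg hx, hm, List.headI, List.tail_cons] at htok
      rcases List.mem_cons.mp htok with h1 | h1
      · subst h1
        rcases List.mem_cons.mp hd with h2 | h2
        · exact List.mem_cons.mpr (Or.inl h2)
        · exact List.mem_cons_of_mem x (ih (hm ▸ List.mem_cons_self) h2)
      · exact List.mem_cons_of_mem x (ih (hm ▸ List.mem_cons_of_mem h h1) hd)

theorem mySplit_of_not_mem {cs : List Char} {c : Char} (h : c ∉ cs) :
    mySplit cs c = [cs] := by
  induction cs with
  | nil => simp [mySplit]
  | cons x xs ih =>
    have hne : ¬ x = c := fun he => h (List.mem_cons.mpr (Or.inl he.symm))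
    simp [mySplit, hne, ih (fun hm => h (List.mem_cons_of_mem x hm))]

-- characterisation: a split into exactly one / two pieces
theorem mySplit_eq_single {cs s : List Char} {c : Char} (h : mySplit cs c = [s]) :
    cs = s ∧ c ∉ s := by
  induction cs generalizing s with
  | nil =>
    simp [mySplit] at h
    exact ⟨h.symm, by simp [h]⟩
  | cons x xs ih =>
    by_cases hx : x = c
    · subst hx
      simp only [mySplit, if_true] at h
      obtain ⟨hd, t, hm⟩ := mySplit_cons xs x
      rw [hm] at h; simp at h
    · obtain ⟨hd, t, hm⟩ := mySplit_cons xs c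
      simp only [mySplit, if_neg hx, hm, List.headI, List.tail_cons] at h
      have h1 : x :: hd = s ∧ t = [] := by
        have := List.cons.injEq (x :: hd) t s [] ▸ h
        exact ⟨(List.cons_eq_cons.mp h).1, (List.cons_eq_cons.mp h).2⟩
      obtain ⟨hs, ht⟩ := h1
      have := ih (s := hd) (by rw [hm, ht])
      refine ⟨by rw [← hs, this.1], ?_⟩
      rw [← hs]
      intro hmem
      rcases List.mem_cons.mp hmem with h2 | h2
      · exact hx h2.symm
      · exact this.2 h2

theorem mySplit_eq_pair {cs s e : List Char} {c : Char} (h : mySplit cs c = [s, e]) :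
    cs = s ++ c :: e ∧ c ∉ s ∧ c ∉ e := by
  induction cs generalizing s with
  | nil => simp [mySplit] at h
  | cons x xs ih =>
    by_cases hx : x = c
    · subst hx
      simp only [mySplit, if_true] at h
      have hs : ([] : List Char) = s ∧ mySplit xs x = [e] := by
        exact ⟨(List.cons_eq_cons.mp h).1, (List.cons_eq_cons.mp h).2⟩
      obtain ⟨hs1, hs2⟩ := hs
      have := mySplit_eq_single hs2
      exact ⟨by rw [← hs1, this.1]; simp, by rw [← hs1]; simp, this.2⟩
    · obtain ⟨hd, t, hm⟩ := mySplit_cons xs c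
      simp only [mySplit, if_neg hx, hm, List.headI, List.tail_cons] at h
      have h1 : x :: hd = s ∧ t = [e] := ⟨(List.cons_eq_cons.mp h).1, (List.cons_eq_cons.mp h).2⟩
      obtain ⟨hs, ht⟩ := h1
      have := ih (s := hd) (by rw [hm, ht])
      refine ⟨?_, ?_, this.2.2⟩
      · rw [← hs, this.1]; rfl
      · rw [← hs]
        intro hmem
        rcases List.mem_cons.mp hmem with h2 | h2
        · exact hx h2.symm
        · exact this.2.1 h2

-- B's per-token semantics, factored for the proofs
def flushSt (out : List String) : List Char × Option (List Char) → List String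
  | (cur, none) => out ++ [String.ofList cur]
  | (cur, some s) => out ++ (PySem.List.pyRange ((PySem.Int.ofChars? s).getD 0)
      ((PySem.Int.ofChars? cur).getD 0 + 1) 1).map PySem.Int.toStr

def absorb (st : List Char × Option (List Char)) (tok : List Char) :
    List Char × Option (List Char) :=
  tok.foldl (fun st ch => if ch = '-' then ([], some st.1) else (st.1 ++ [ch], st.2)) st

def flushTok (out : List String) (tok : List Char) : List String :=
  flushSt out (absorb ([], none) tok)

theorem absorb_cons (st : List Char × Option (List Char)) (ch : Char) (tok : List Char) :
    absorb st (ch :: tok)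
      = absorb (if ch = '-' then ([], some st.1) else (st.1 ++ [ch], st.2)) tok := rfl

theorem absorb_no_dash {tok : List Char} (h : '-' ∉ tok)
    (cur : List Char) (start : Option (List Char)) :
    absorb (cur, start) tok = (cur ++ tok, start) := by
  induction tok generalizing cur with
  | nil => simp [absorb]
  | cons ch rest ih =>
    have hc : ¬ ch = '-' := fun he => h (he ▸ List.mem_cons_self)
    rw [absorb_cons]
    simp only [if_neg hc]
    rw [ih (fun hm => h (List.mem_cons_of_mem ch hm))]
    simp

-- the scan over cs ++ [','] is the flushTok fold over mySplit cs ','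
theorem fbGo_eq (cs : List Char) (out : List String) (cur : List Char)
    (start : Option (List Char)) :
    fbGo out cur start (cs ++ [','])
      = ((mySplit cs ',').tail).foldl flushTok
          (flushSt out (absorb (cur, start) (mySplit cs ',').headI)) := by
  induction cs generalizing out cur start with
  | nil =>
    simp only [List.nil_append, fbGo, mySplit, List.headI, List.tail_cons,
      List.foldl_nil, absorb, List.foldl_nil]
    cases start <;> rfl
  | cons c rest ih =>
    obtain ⟨hd, t, hm⟩ := mySplit_cons rest ','
    by_cases hc : c = ','
    · subst hc
      simp only [List.cons_append, fbGo, reduceIte]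
      rw [ih]
      simp only [mySplit, reduceIte, hm, List.headI, List.tail_cons, List.foldl_cons]
      have h0 : absorb (cur, start) [] = (cur, start) := by simp [absorb]
      rw [h0]
      rcases start with _ | s <;> rfl
    · by_cases hd2 : c = '-'
      · subst hd2
        simp only [List.cons_append, fbGo, if_neg hc, reduceIte]
        rw [ih]
        simp only [mySplit, if_neg hc, hm, List.headI, List.tail_cons]
        rw [absorb_cons]
        simp
      · simp only [List.cons_append, fbGo, if_neg hc, if_neg hd2]
        rw [ih]
        simp only [mySplit, if_neg hc, hm, List.headI, List.tail_cons]
        rw [absorb_cons]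
        simp [hd2]

theorem alt_eq_fold (batchs : String) :
    format_batchs_alt batchs = (mySplit batchs.toList ',').foldl flushTok [] := by
  rw [format_batchs_alt, fbGo_eq]
  obtain ⟨hd, t, hm⟩ := mySplit_cons batchs.toList ','
  rw [hm]
  simp [flushTok]

-- per-token values of flushTok
theorem flushTok_no_dash {tok : List Char} (h : '-' ∉ tok) (out : List String) :
    flushTok out tok = out ++ [String.ofList tok] := by
  rw [flushTok, absorb_no_dash h]
  rfl

theorem flushTok_pair {tok s e : List Char} (h : mySplit tok '-' = [s, e])
    (out : List String) :
    flushTok out tok = out ++ (PySem.List.pyRange ((PySem.Int.ofChars? s).getD 0)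
      ((PySem.Int.ofChars? e).getD 0 + 1) 1).map PySem.Int.toStr := by
  obtain ⟨heq, hs, he⟩ := mySplit_eq_pair h
  rw [flushTok, heq]
  have h1 : absorb ([], none) (s ++ '-' :: e) = (e, some s) := by
    rw [absorb, List.foldl_append, ← absorb, ← absorb, absorb_no_dash hs]
    rw [absorb_cons]
    simp only [List.nil_append]
    rw [absorb_no_dash he]
    simp
  rw [h1]
  rfl

-- bridging facts about the separators
theorem splitOn_comma_no_dash {batchs : String} (h2 : PySem.Str.isIn "-" batchs = false)
    {tok : List Char} (htok : tok ∈ PySem.Chars.splitOn batchs.toList [',']) :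
    '-' ∉ tok := by
  rw [splitOn_single] at htok
  intro hd
  have hmem : ('-' : Char) ∈ batchs.toList := mem_of_mem_mySplit htok hd
  have : PySem.Str.isIn "-" batchs = true := by
    rw [PySem.Str.isIn_eq, show ("-" : String).toList = ['-'] from rfl, isIn_single]
    exact hmem
  rw [h2] at this
  exact Bool.false_ne_true this

theorem no_comma_splitOn {batchs : String} (h1 : PySem.Str.isIn "," batchs = false) :
    PySem.Chars.splitOn batchs.toList [','] = [batchs.toList] := by
  rw [splitOn_single]
  refine mySplit_of_not_mem (fun hm => ?_)
  have : PySem.Str.isIn "," batchs = true := by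
    rw [PySem.Str.isIn_eq, show ("," : String).toList = [','] from rfl, isIn_single]
    exact hm
  rw [h1] at this
  exact Bool.false_ne_true this

-- ===== VERDICT (by name: the statement is the Claim_ definition above) =====
theorem format_batchs_spec : Claim_equal_format_batchs := by
  intro batchs _ hpre
  unfold Spec_format_batchs
  rw [alt_eq_fold, ← splitOn_single]
  unfold format_batchs
  cases h1 : PySem.Str.isIn "," batchs <;> cases h2 : PySem.Str.isIn "-" batchs
  · -- neither separator
    have hone := no_comma_splitOn h1
    have hdash : '-' ∉ batchs.toList :=
      splitOn_comma_no_dash h2 (hone ▸ List.mem_cons_self)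
    simp only [Bool.false_and, Bool.false_eq_true, if_false, hone,
      List.foldl_cons, List.foldl_nil]
    rw [flushTok_no_dash hdash, String.ofList_toList]
    rfl
  · -- '-' only
    have hone := no_comma_splitOn h1
    have hin : batchs.toList ∈ PySem.Chars.splitOn batchs.toList [','] :=
      hone ▸ List.mem_cons_self
    have hdashIn : PySem.Chars.isIn ['-'] batchs.toList = true := by
      rw [← show ("-" : String).toList = ['-'] from rfl, ← PySem.Str.isIn_eq]; exact h2
    obtain ⟨hlen, _⟩ := hpre _ hin hdashIn
    rw [splitOn_single] at hlen
    rcases hsp : mySplit batchs.toList '-' with _ | ⟨s, _ | ⟨e, _ | _⟩⟩ <;>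
      rw [hsp] at hlen <;> simp at hlen
    simp only [Bool.false_and, Bool.false_eq_true, if_false, if_true, hone,
      List.foldl_cons, List.foldl_nil]
    rw [flushTok_pair hsp, splitOn_single, hsp]
    simp
  · -- ',' only: no token contains '-'
    simp only [Bool.and_false, Bool.false_eq_true, if_false, if_true]
    refine PySem.List.foldl_congr_mem _ _ _ _ ?_
    intro acc tok htok
    rw [flushTok_no_dash (splitOn_comma_no_dash h2 htok)]
  · -- both separators
    simp only [Bool.and_self, if_true]
    refine (PySem.List.foldl_congr_mem _ _ _ _ ?_).symm
    intro acc tok htok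
    by_cases hdash : PySem.Chars.isIn ['-'] tok = true
    · obtain ⟨hlen, _⟩ := hpre _ htok hdash
      rw [splitOn_single] at hlen
      rcases hsp : mySplit tok '-' with _ | ⟨s, _ | ⟨e, _ | _⟩⟩ <;>
        rw [hsp] at hlen <;> simp at hlen
      rw [flushTok_pair hsp]
      simp only [hdash, if_true, splitOn_single, hsp]
    · have hd' : PySem.Chars.isIn ['-'] tok = false := by simpa using hdash
      have hnd : '-' ∉ tok := fun hm => hdash ((isIn_single _ _).mpr hm)
      rw [flushTok_no_dash hnd]
      simp [hd']
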